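-- pv_equiv track=rewrite | github.com/rhlsthrm/LeoClaw | packages/apple-mail-mcp/test_security.py | ends_with_unescaped_backslash
-- ===== SOURCE A (Python) =====
-- def ends_with_unescaped_backslash(s: str) -> bool:
--     """Return True if s ends with an odd number of backslashes."""
--     count = 0
--     for c in reversed(s):
--         if c == '\\':
--             count += 1
--         else:
--             break
--     return count % 2 == 1
-- ===== SOURCE B (Python) =====
-- def ends_with_unescaped_backslash(s: str) -> bool:
--     """Return True if s ends with an odd number of backslashes."""
--     odd = False
--     for c in s:
--         odd = (not odd) if c == '\\' else False
--     return odd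
-- ===== Notes on version B (the rewrite author's own statement) =====
-- stated objective: alternative
-- what changed: Replaces A's reversed-iteration counting loop (count trailing backslashes, then take parity) with a single forward pass that maintains only a boolean parity flag: toggled on each backslash, reset on any other character; no count and no reversal are ever computed.
import Mathlib
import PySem

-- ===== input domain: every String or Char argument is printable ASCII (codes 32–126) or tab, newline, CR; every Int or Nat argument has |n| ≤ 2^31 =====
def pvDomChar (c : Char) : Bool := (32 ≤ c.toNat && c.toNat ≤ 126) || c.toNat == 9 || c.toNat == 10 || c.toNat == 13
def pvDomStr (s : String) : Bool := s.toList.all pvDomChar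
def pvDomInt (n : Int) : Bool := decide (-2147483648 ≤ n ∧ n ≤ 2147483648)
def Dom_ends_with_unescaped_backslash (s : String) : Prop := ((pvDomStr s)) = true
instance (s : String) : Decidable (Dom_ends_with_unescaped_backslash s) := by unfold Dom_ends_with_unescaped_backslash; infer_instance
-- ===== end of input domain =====

-- B replaces A's reversed-iteration trailing-backslash count with a single
-- forward pass maintaining only a boolean parity flag; objective: alternative.

-- ===== PORT A =====
-- the 'for c in reversed(s): if c == '\\': count += 1 else: break' loop,
-- as structural recursion over the reversed character list with early stop
def ewubCountLoop : List Char → Nat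
  | [] => 0
  | c :: rest => if c = '\\' then ewubCountLoop rest + 1 else 0

def ends_with_unescaped_backslash (s : String) : Bool :=
  ewubCountLoop s.toList.reverse % 2 == 1

-- ===== PORT B =====
-- the forward pass: 'odd = (not odd) if c == '\\' else False' per character
def ends_with_unescaped_backslash_alt (s : String) : Bool :=
  s.toList.foldl (fun odd c => if c = '\\' then !odd else false) false

-- ===== PRECONDITION & SPEC =====
def Spec_ends_with_unescaped_backslash (s : String) (out : Bool) : Prop := out = ends_with_unescaped_backslash_alt s
instance (s : String) (out : Bool) : Decidable (Spec_ends_with_unescaped_backslash s out) := by unfold Spec_ends_with_unescaped_backslash; infer_instance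

-- ===== CLAIM (what is proved, stated in full; the proofs are below) =====
def Claim_equal_ends_with_unescaped_backslash : Prop := ∀ (s : String), Dom_ends_with_unescaped_backslash s → Spec_ends_with_unescaped_backslash s (ends_with_unescaped_backslash s)

-- ===== LEMMAS AND PROOFS =====

-- B's forward fold computes the parity of the trailing backslash run counted by A's loop
theorem ewub_fold_eq_count_parity (l : List Char) :
    l.foldl (fun odd c => if c = '\\' then !odd else false) false
      = (ewubCountLoop l.reverse % 2 == 1) := by
  induction l using List.reverseRecOn with
  | nil => rfl
  | append_singleton l c ih =>
    rw [List.foldl_append, ih]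
    by_cases h : c = '\\'
    · simp only [List.foldl_cons, List.foldl_nil, List.reverse_append,
        List.reverse_singleton, List.singleton_append, ewubCountLoop, h]
      rcases Nat.even_or_odd (ewubCountLoop l.reverse) with he | ho
      · rw [Nat.even_iff] at he; simp [Nat.add_mod, he]
      · rw [Nat.odd_iff] at ho; simp [Nat.add_mod, ho]
    · simp [List.reverse_append, ewubCountLoop, h]

-- ===== VERDICT (by name: the statement is the Claim_ definition above) =====
theorem ends_with_unescaped_backslash_spec : Claim_equal_ends_with_unescaped_backslash := by
  intro s _
  unfold Spec_ends_with_unescaped_backslash ends_with_unescaped_backslash ends_with_unescaped_backslash_alt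
  exact (ewub_fold_eq_count_parity s.toList).symm
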